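-- pv_equiv track=rewrite | github.com/nirajsingh0878/CYK-BU_Parser | CYK-PARSER.py | match_list_index
-- ===== SOURCE A (Python) =====
-- def match_list_index(list1,list2,dict_values):
--     index = []
--     for i1 in list1:
--         for i2 in list2:
--             temp = i1+" "+i2
--             i=0
--             for i3 in dict_values:
--                 if(i3==temp):
--                     index.append(i)
--                 i += 1
--
--     return index
-- ===== SOURCE B (Python) =====
-- def match_list_index(list1, list2, dict_values):
--     # Build a hash map string -> list of indices once, then one lookup per pair.
--     pos = {}
--     for i, s in enumerate(dict_values):
--         pos.setdefault(s, []).append(i)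
--     out = []
--     for i1 in list1:
--         for i2 in list2:
--             out.extend(pos.get(i1 + " " + i2, []))
--     return out
-- ===== Notes on version B (the rewrite author's own statement) =====
-- stated objective: faster
-- what changed: B precomputes a hash map from each dict_values string to its index list once, replacing A's full scan of dict_values for every (list1,list2) pair with a single dictionary lookup per pair.
import Mathlib
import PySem

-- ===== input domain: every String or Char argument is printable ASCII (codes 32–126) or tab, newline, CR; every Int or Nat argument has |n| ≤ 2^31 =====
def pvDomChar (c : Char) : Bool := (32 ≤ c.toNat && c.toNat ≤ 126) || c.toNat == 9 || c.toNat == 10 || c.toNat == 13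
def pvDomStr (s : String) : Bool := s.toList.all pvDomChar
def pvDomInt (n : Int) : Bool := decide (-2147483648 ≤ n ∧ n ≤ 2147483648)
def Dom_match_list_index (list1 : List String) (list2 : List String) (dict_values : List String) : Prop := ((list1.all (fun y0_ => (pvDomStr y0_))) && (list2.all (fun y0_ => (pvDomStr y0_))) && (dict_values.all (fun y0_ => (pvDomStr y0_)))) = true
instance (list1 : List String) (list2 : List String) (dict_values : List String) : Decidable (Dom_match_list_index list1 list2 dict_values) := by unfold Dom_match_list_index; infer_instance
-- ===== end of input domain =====

-- B replaces A's inner scan of dict_values per pair with one precomputed string→indices map (faster, asymptotic).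

-- ===== PORT A =====
def match_list_index (list1 : List String) (list2 : List String) (dict_values : List String) : List Int :=
  list1.foldl (fun index i1 =>
    list2.foldl (fun index i2 =>
      let temp := i1 ++ " " ++ i2
      (dict_values.foldl (fun (st : List Int × Int) i3 =>
        (if i3 == temp then st.1 ++ [st.2] else st.1, st.2 + 1)) (index, 0)).1
    ) index) []

-- ===== PORT B =====
-- pos = {}; for i, s in enumerate(dict_values): pos.setdefault(s, []).append(i)
def buildPos (dict_values : List String) : PySem.Dict String (List Int) :=
  (PySem.List.enumerate dict_values).foldl
    (fun d p => d.modify p.2 [] (· ++ [p.1])) PySem.Dict.empty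

def match_list_index_alt (list1 : List String) (list2 : List String) (dict_values : List String) : List Int :=
  let pos := buildPos dict_values
  list1.foldl (fun out i1 =>
    list2.foldl (fun out i2 =>
      out ++ pos.getD (i1 ++ " " ++ i2) []) out) []

-- ===== PRECONDITION & SPEC =====
def Spec_match_list_index (list1 : List String) (list2 : List String) (dict_values : List String) (out : List Int) : Prop := out = match_list_index_alt list1 list2 dict_values
instance (list1 : List String) (list2 : List String) (dict_values : List String) (out : List Int) : Decidable (Spec_match_list_index list1 list2 dict_values out) := by unfold Spec_match_list_index; infer_instance

-- ===== CLAIM (what is proved, stated in full; the proofs are below) =====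
def Claim_equal_match_list_index : Prop := ∀ (list1 : List String) (list2 : List String) (dict_values : List String), Dom_match_list_index list1 list2 dict_values → Spec_match_list_index list1 list2 dict_values (match_list_index list1 list2 dict_values)

-- ===== LEMMAS AND PROOFS =====

-- the matching indices of t in dv, counting from c
def idxOf (dv : List String) (t : String) (c : Int) : List Int :=
  match dv with
  | [] => []
  | x :: rest => (if x == t then [c] else []) ++ idxOf rest t (c + 1)

theorem innerA_eq (dv : List String) (t : String) (acc : List Int) (c : Int) :
    (dv.foldl (fun (st : List Int × Int) i3 =>
      (if i3 == t then st.1 ++ [st.2] else st.1, st.2 + 1)) (acc, c)).1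
    = acc ++ idxOf dv t c := by
  induction dv generalizing acc c with
  | nil => simp [idxOf]
  | cons x rest ih =>
    simp only [List.foldl_cons, idxOf]
    rw [ih]
    by_cases h : x == t <;> simp [h]

theorem buildPos_fold (dv : List String) (d : PySem.Dict String (List Int)) (s : Int) (t : String) :
    (((PySem.List.enumerate dv s).foldl
      (fun d p => d.modify p.2 [] (· ++ [p.1])) d).getD t [])
    = d.getD t [] ++ idxOf dv t s := by
  induction dv generalizing d s with
  | nil => simp [PySem.List.enumerate_nil, idxOf]
  | cons x rest ih =>
    rw [PySem.List.enumerate_cons]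
    simp only [List.foldl_cons, idxOf]
    rw [ih]
    rw [PySem.Dict.getD_modify]
    by_cases h : t = x
    · simp [h]
    · simp [h, beq_iff_eq, Ne.symm h]

theorem getD_buildPos (dv : List String) (t : String) :
    (buildPos dv).getD t [] = idxOf dv t 0 := by
  unfold buildPos
  rw [buildPos_fold]
  simp [PySem.Dict.getD_empty]

theorem match_list_index_spec : Claim_equal_match_list_index := by
  intro list1 list2 dv _
  unfold Spec_match_list_index match_list_index match_list_index_alt
  simp only [innerA_eq, getD_buildPos]
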